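-- pv_equiv track=rewrite | github.com/shirinyamani/leetcode | Arrays.py | FindPositiveMissing1
-- ===== SOURCE A (Python) =====
-- def FindPositiveMissing1(nums):
--     #start nums from 1 (ignore - & 0)
--     smallest = 1
--     #no repeated
--     n = set(nums)
--     while True:
--         #IF its in the array, then try the nxt possitive
--         if smallest in n:
--             smallest = smallest + 1
--         else: #if not in array!
--             return smallest
-- ===== SOURCE B (Python) =====
-- def FindPositiveMissing1(nums):
--     expected = 1
--     for v in sorted(nums):
--         if v == expected:
--             expected += 1
--         elif v > expected:
--             break
--     return expected
-- ===== Notes on version B (the rewrite author's own statement) =====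
-- stated objective: alternative
-- what changed: Replaces the unbounded set-membership probing loop (build a set, test 1,2,3,... until a miss) with sort-then-scan: sort a copy of nums and make one left-to-right pass maintaining expected=1, incrementing on a match and stopping early on a gap.
import Mathlib
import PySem

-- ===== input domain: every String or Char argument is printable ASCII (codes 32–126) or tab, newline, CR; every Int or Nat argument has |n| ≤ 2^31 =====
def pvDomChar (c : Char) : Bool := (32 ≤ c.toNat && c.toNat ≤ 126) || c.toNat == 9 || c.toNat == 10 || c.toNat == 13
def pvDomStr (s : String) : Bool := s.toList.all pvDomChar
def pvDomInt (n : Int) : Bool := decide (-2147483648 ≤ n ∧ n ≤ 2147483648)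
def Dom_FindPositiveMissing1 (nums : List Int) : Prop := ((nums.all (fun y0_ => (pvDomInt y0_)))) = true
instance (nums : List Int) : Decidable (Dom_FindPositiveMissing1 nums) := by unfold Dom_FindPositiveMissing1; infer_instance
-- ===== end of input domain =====

-- B replaces A's set-membership probing loop by sort-a-copy + one ordered scan; objective: alternative algorithm.

-- ===== PORT A =====
-- termination measure: the number of set elements ≥ smallest strictly drops on each probe hit
theorem pvCountP_lt (n : List Int) (s : Int) (h : s ∈ n) :
    n.countP (fun x => decide (s + 1 ≤ x)) < n.countP (fun x => decide (s ≤ x)) := by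
  induction n with
  | nil => cases h
  | cons a t ih =>
    rcases List.mem_cons.mp h with rfl | hm
    · have hmono : t.countP (fun x => decide (s + 1 ≤ x)) ≤ t.countP (fun x => decide (s ≤ x)) :=
        List.countP_mono_left (by intro x _ hx; simp only [decide_eq_true_eq] at hx ⊢; omega)
      simp only [List.countP_cons, decide_eq_true_eq]
      split_ifs <;> omega
    · have := ih hm
      simp only [List.countP_cons, decide_eq_true_eq]
      split_ifs <;> omega

-- the 'while True' loop of A
def pvProbe (n : PySem.Set Int) (smallest : Int) : Int :=
  if PySem.Set.contains n smallest then pvProbe n (smallest + 1) else smallest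
termination_by (n : List Int).countP (fun x => decide (smallest ≤ x))
decreasing_by
  rename_i h
  exact pvCountP_lt n smallest (by simpa [PySem.Set.contains] using h)

def FindPositiveMissing1 (nums : List Int) : Int :=
  pvProbe (PySem.Set.ofList nums) 1

-- ===== PORT B =====
-- the for-loop over sorted(nums) with early break
def pvScan : List Int → Int → Int
  | [], expected => expected
  | v :: t, expected =>
    if v = expected then pvScan t (expected + 1)
    else if v > expected then expected
    else pvScan t expected

def FindPositiveMissing1_alt (nums : List Int) : Int :=
  pvScan (PySem.List.sorted nums (fun x => x) false) 1

-- ===== PRECONDITION & SPEC =====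
def Spec_FindPositiveMissing1 (nums : List Int) (out : Int) : Prop := out = FindPositiveMissing1_alt nums
instance (nums : List Int) (out : Int) : Decidable (Spec_FindPositiveMissing1 nums out) := by unfold Spec_FindPositiveMissing1; infer_instance

-- ===== CLAIM (what is proved, stated in full; the proofs are below) =====
def Claim_equal_FindPositiveMissing1 : Prop := ∀ (nums : List Int), Dom_FindPositiveMissing1 nums → Spec_FindPositiveMissing1 nums (FindPositiveMissing1 nums)

-- ===== LEMMAS AND PROOFS =====

-- Both loops compute the least j ≥ start missing from their list; this characterisation is unique.

theorem pvProbe_spec (n : PySem.Set Int) (s : Int) :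
    s ≤ pvProbe n s ∧ pvProbe n s ∉ n ∧
      ∀ j, s ≤ j → j < pvProbe n s → j ∈ n := by
  induction s using pvProbe.induct n with
  | case1 s hc ih =>
    rw [pvProbe, if_pos hc]
    have hmem : s ∈ n := by simpa [PySem.Set.contains] using hc
    refine ⟨by omega, ih.2.1, ?_⟩
    intro j hj hlt
    rcases eq_or_lt_of_le hj with rfl | h'
    · exact hmem
    · exact ih.2.2 j (by omega) hlt
  | case2 s hc =>
    rw [pvProbe, if_neg hc]
    exact ⟨le_refl _, by simpa [PySem.Set.contains] using hc, fun j hj hlt => absurd hlt (by omega)⟩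

theorem pvScan_spec (l : List Int) (e : Int) (hs : l.Pairwise (· ≤ ·)) :
    e ≤ pvScan l e ∧ pvScan l e ∉ l ∧ ∀ j, e ≤ j → j < pvScan l e → j ∈ l := by
  induction l generalizing e with
  | nil => exact ⟨le_refl _, by simp, fun j hj hlt => absurd hlt (by simp [pvScan] at hlt ⊢; omega)⟩
  | cons v t ih =>
    have hvt : ∀ x ∈ t, v ≤ x := fun x hx => (List.pairwise_cons.mp hs).1 x hx
    have ht : t.Pairwise (· ≤ ·) := (List.pairwise_cons.mp hs).2
    by_cases h1 : v = e
    · subst h1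
      rw [pvScan, if_pos rfl]
      obtain ⟨hle, hnm, hall⟩ := ih (v + 1) ht
      refine ⟨by omega, ?_, ?_⟩
      · simp only [List.mem_cons, not_or]
        exact ⟨by omega, hnm⟩
      · intro j hj hlt
        rcases eq_or_lt_of_le hj with rfl | h'
        · exact List.mem_cons_self
        · exact List.mem_cons_of_mem _ (hall j (by omega) hlt)
    · rw [pvScan, if_neg h1]
      by_cases h2 : v > e
      · rw [if_pos h2]
        refine ⟨le_refl _, ?_, fun j hj hlt => absurd hlt (by omega)⟩
        simp only [List.mem_cons, not_or]
        exact ⟨by omega, fun hm => by have := hvt e hm; omega⟩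
      · rw [if_neg h2]
        obtain ⟨hle, hnm, hall⟩ := ih e ht
        refine ⟨hle, ?_, fun j hj hlt => List.mem_cons_of_mem _ (hall j hj hlt)⟩
        simp only [List.mem_cons, not_or]
        exact ⟨fun hh => by omega, hnm⟩

theorem pvLeastUnique (nums : List Int) (k1 k2 : Int)
    (h1 : 1 ≤ k1) (h1n : k1 ∉ nums) (h1a : ∀ j, 1 ≤ j → j < k1 → j ∈ nums)
    (h2 : 1 ≤ k2) (h2n : k2 ∉ nums) (h2a : ∀ j, 1 ≤ j → j < k2 → j ∈ nums) :
    k1 = k2 := by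
  rcases lt_trichotomy k1 k2 with h | h | h
  · exact absurd (h2a k1 h1 h) h1n
  · exact h
  · exact absurd (h1a k2 h2 h) h2n

-- ===== VERDICT (by name: the statement is the Claim_ definition above) =====
theorem FindPositiveMissing1_spec : Claim_equal_FindPositiveMissing1 := by
  intro nums _
  unfold Spec_FindPositiveMissing1 FindPositiveMissing1 FindPositiveMissing1_alt
  obtain ⟨ha1, ha2, ha3⟩ := pvProbe_spec (PySem.Set.ofList nums) 1
  have hsorted : (PySem.List.sorted nums (fun x => x) false).Pairwise (· ≤ ·) := by
    simpa using PySem.List.sorted_pairwise nums (fun x => x)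
  obtain ⟨hb1, hb2, hb3⟩ := pvScan_spec (PySem.List.sorted nums (fun x => x) false) 1 hsorted
  refine pvLeastUnique nums _ _ ha1 ?_ ?_ hb1 ?_ ?_
  · simpa [PySem.Set.mem_ofList] using ha2
  · intro j hj hlt; simpa [PySem.Set.mem_ofList] using ha3 j hj hlt
  · simpa [PySem.List.mem_sorted] using hb2
  · intro j hj hlt; simpa [PySem.List.mem_sorted] using hb3 j hj hlt
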